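-- pv_equiv track=rewrite | github.com/Eroject/LAN-WAN-Configurator | APP.py | prefixe
-- ===== SOURCE A (Python) =====
-- def prefixe(nbr_machine):
--     n=0
--     i=1
--     while (n<nbr_machine):
--         i=i+1
--         n=2**i-2
--     prefixe=32-i
--     return(prefixe)
--
-- nbr_machine=[]
-- ===== SOURCE B (Python) =====
-- def prefixe(nbr_machine):
--     if nbr_machine <= 0:
--         return 31
--     return 32 - (nbr_machine + 1).bit_length()
-- ===== Notes on version B (the rewrite author's own statement) =====
-- stated objective: simpler
-- what changed: Replaced the doubling while-loop search with a direct bit-length computation of the smallest sufficient host-part width.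
import Mathlib
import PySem

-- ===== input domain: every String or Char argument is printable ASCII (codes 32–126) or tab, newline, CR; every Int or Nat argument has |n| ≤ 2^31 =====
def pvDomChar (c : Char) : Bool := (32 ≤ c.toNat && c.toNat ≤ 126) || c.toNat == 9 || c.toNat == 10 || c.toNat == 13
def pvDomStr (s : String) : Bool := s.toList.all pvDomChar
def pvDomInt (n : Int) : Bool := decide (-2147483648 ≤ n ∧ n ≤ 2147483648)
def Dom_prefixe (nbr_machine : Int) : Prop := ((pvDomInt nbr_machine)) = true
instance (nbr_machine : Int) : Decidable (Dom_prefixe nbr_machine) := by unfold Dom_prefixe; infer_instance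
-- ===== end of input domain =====

-- B replaces A's doubling while-loop with a closed-form bit-length formula (objective: simpler).

-- ===== PORT A =====
-- A's while-loop: state (n, i), i is a nonnegative counter starting at 1.
-- Fuel (nbr_machine.toNat + 2) is a totality guard only; it is proved sufficient below.
def prefixeLoop (nbr_machine : Int) : Nat → Int → Nat → Nat
  | 0, _, i => i
  | fuel + 1, n, i =>
      if n < nbr_machine then prefixeLoop nbr_machine fuel ((2 : Int) ^ (i + 1) - 2) (i + 1)
      else i

def prefixe (nbr_machine : Int) : Int :=
  32 - (prefixeLoop nbr_machine (nbr_machine.toNat + 2) 0 1 : Int)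

-- ===== PORT B =====
-- (m).bit_length() for m ≥ 1 is Nat.log2 m + 1 (hand port; exact for positive arguments).
def bitLength (m : Nat) : Nat := if m = 0 then 0 else Nat.log2 m + 1

def prefixe_alt (nbr_machine : Int) : Int :=
  if nbr_machine ≤ 0 then 31
  else 32 - (bitLength (nbr_machine + 1).toNat : Int)

-- ===== PRECONDITION & SPEC =====
def Spec_prefixe (nbr_machine : Int) (out : Int) : Prop := out = prefixe_alt nbr_machine
instance (nbr_machine : Int) (out : Int) : Decidable (Spec_prefixe nbr_machine out) := by unfold Spec_prefixe; infer_instance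

-- ===== CLAIM (what is proved, stated in full; the proofs are below) =====
def Claim_equal_prefixe : Prop := ∀ (nbr_machine : Int), Dom_prefixe nbr_machine → Spec_prefixe nbr_machine (prefixe nbr_machine)

-- ===== LEMMAS AND PROOFS =====

-- If the loop condition is false, the loop returns the current i (any fuel).
theorem prefixeLoop_stop (nbr : Int) (fuel : Nat) (n : Int) (i : Nat) (h : ¬ n < nbr) :
    prefixeLoop nbr fuel n i = i := by
  cases fuel with
  | zero => rfl
  | succ f => simp [prefixeLoop, h]

theorem log2_eq_of (m j : Nat) (h1 : 2 ^ j ≤ m) (h2 : m < 2 ^ (j + 1)) : Nat.log2 m = j := by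
  have hm : m ≠ 0 := by
    have := Nat.one_le_two_pow (n := j)
    omega
  have hle : j ≤ Nat.log2 m := (Nat.le_log2 hm).mpr h1
  have hlt : Nat.log2 m < j + 1 := (Nat.log2_lt hm).mpr h2
  omega

-- Main loop invariant: starting from the state (2^i - 2, i) with the loop condition true
-- and enough fuel, the loop returns Nat.log2 (nbr+1).toNat + 1.
theorem prefixeLoop_spec (nbr : Int) (hn : 1 ≤ nbr) :
    ∀ (fuel i : Nat), nbr + 2 ≤ 2 ^ (i + fuel) → (2 : Int) ^ i - 2 < nbr →
      prefixeLoop nbr fuel ((2 : Int) ^ i - 2) i = Nat.log2 (nbr + 1).toNat + 1 := by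
  intro fuel
  induction fuel with
  | zero =>
      intro i hfu hlt
      simp only [Nat.add_zero] at hfu
      omega
  | succ f ih =>
      intro i hfu hlt
      simp only [prefixeLoop, if_pos hlt]
      by_cases h2 : (2 : Int) ^ (i + 1) - 2 < nbr
      · have hfu' : nbr + 2 ≤ 2 ^ ((i + 1) + f) := by
          rw [show (i + 1) + f = i + (f + 1) from by omega]; exact hfu
        exact ih (i + 1) hfu' h2
      · rw [prefixeLoop_stop nbr f _ (i + 1) h2]
        -- here 2^i ≤ nbr+1 < 2^(i+1), so log2 (nbr+1) = i
        have hm : ((nbr + 1).toNat : Int) = nbr + 1 := Int.toNat_of_nonneg (by omega)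
        have h1 : 2 ^ i ≤ (nbr + 1).toNat := by
          have : (2 : Int) ^ i ≤ nbr + 1 := by omega
          have := this.trans_eq hm.symm
          exact_mod_cast this
        have h2' : (nbr + 1).toNat < 2 ^ (i + 1) := by
          have : nbr + 1 < (2 : Int) ^ (i + 1) := by omega
          rw [← hm] at this
          exact_mod_cast this
        rw [log2_eq_of _ i h1 h2']

theorem prefixe_eq (nbr : Int) : prefixe nbr = prefixe_alt nbr := by
  by_cases h : nbr ≤ 0
  · have : prefixeLoop nbr (nbr.toNat + 2) 0 1 = 1 := by
      rw [show nbr.toNat + 2 = (nbr.toNat + 1) + 1 from rfl]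
      exact prefixeLoop_stop nbr _ 0 1 (by omega)
    simp [prefixe, prefixe_alt, this, h]
  · have hn : 1 ≤ nbr := by omega
    have hfu : nbr + 2 ≤ 2 ^ (1 + (nbr.toNat + 2)) := by
      have h1 : nbr.toNat < 2 ^ nbr.toNat := Nat.lt_two_pow_self
      have h2 : (nbr.toNat : Int) < (2 : Int) ^ nbr.toNat := by exact_mod_cast h1
      have h3 : ((2 : Int) ^ nbr.toNat) * 8 ≤ (2 : Int) ^ (1 + (nbr.toNat + 2)) := by
        rw [show 1 + (nbr.toNat + 2) = nbr.toNat + 3 from by omega, pow_add]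
        norm_num
      have h4 : (nbr.toNat : Int) = nbr := Int.toNat_of_nonneg (by omega)
      nlinarith [pow_pos (show (0:Int) < 2 by norm_num) nbr.toNat]
    have hlt : (2 : Int) ^ (1 : Nat) - 2 < nbr := by norm_num; omega
    have hloop := prefixeLoop_spec nbr hn (nbr.toNat + 2) 1 hfu hlt
    have h0 : (2 : Int) ^ (1 : Nat) - 2 = 0 := by norm_num
    rw [h0] at hloop
    have hm0 : (nbr + 1).toNat ≠ 0 := by omega
    simp [prefixe, prefixe_alt, hloop, h, bitLength, hm0]

-- ===== VERDICT (by name: the statement is the Claim_ definition above) =====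
theorem prefixe_spec : Claim_equal_prefixe := by
  intro nbr _
  exact prefixe_eq nbr
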